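-- pv_equiv track=rewrite | github.com/sergei-grechanik/ikup | ikup/testing/output_comparison.py | parse_chunks_from_content
-- ===== SOURCE A (Python) =====
-- from typing import Dict, Tuple, List, Optional, Pattern, Match, Any
--
-- TestChunks = Dict[str, Tuple[List[str], List[int]]]
--
-- def parse_chunks_from_content(content: str) -> TestChunks:
--     """Parse string content into test chunks with line number tracking.
--
--     Args:
--         content: Input string to parse
--
--     Returns:
--         Dictionary mapping test names to tuples of (lines, line_numbers)
--
--     Raises:
--         ValueError: If duplicate test names are found
--     """
--     chunks: TestChunks = {}
--     current_test: Optional[str] = None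
--     lines: List[str] = []
--     line_numbers: List[int] = []
--
--     # Process each line with its original line number
--     for line_num, line in enumerate(content.split("\n"), 1):
--         line = line.rstrip("\n")
--         if line.startswith("========== TEST "):
--             test_name = line
--             if current_test:
--                 chunks[current_test] = (lines.copy(), line_numbers.copy())
--                 lines.clear()
--                 line_numbers.clear()
--             if test_name in chunks:
--                 raise ValueError(
--                     f"Duplicate test name '{test_name}' at line {line_num}"
--                 )
--             current_test = test_name
--         elif current_test is not None:
--             # Capture all lines including leading empty ones
--             lines.append(line)
--             line_numbers.append(line_num)
--     if current_test is not None: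
--         # Strip trailing empty lines from both input and reference
--         while lines and not lines[-1].strip():
--             lines.pop()
--             line_numbers.pop()
--         chunks[current_test] = (lines, line_numbers)
--     return chunks
-- ===== SOURCE B (Python) =====
-- def parse_chunks_from_content(content):
--     """Parse string content into test chunks with line number tracking.
--
--     Queue-based decomposition: drop the preamble before the first header,
--     then repeatedly consume one header and span off its body.
--     """
--     def is_header(line):
--         return line.startswith("========== TEST ")
--
--     numbered = list(enumerate(content.split("\n"), 1))
--     # ignore everything before the first header
--     while numbered and not is_header(numbered[0][1]):
--         numbered.pop(0)
--     chunks = {}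
--     while numbered:
--         line_num, name = numbered.pop(0)
--         if name in chunks:
--             raise ValueError(f"Duplicate test name '{name}' at line {line_num}")
--         body = []
--         while numbered and not is_header(numbered[0][1]):
--             body.append(numbered.pop(0))
--         if not numbered:
--             # last chunk: drop trailing blank lines
--             while body and not body[-1][1].strip():
--                 body.pop()
--         chunks[name] = ([l for _, l in body], [n for n, _ in body])
--     return chunks
-- ===== Notes on version B (the rewrite author's own statement) =====
-- stated objective: alternative
-- what changed: A is a one-pass state machine with mutable accumulators (chunks/current_test/lines/line_numbers); B is a queue decomposition: drop the preamble before the first header, then repeatedly consume a header and span off its whole body (as numbered pairs) in one go, stripping trailing blanks only when the queue is exhausted.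
import Mathlib
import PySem

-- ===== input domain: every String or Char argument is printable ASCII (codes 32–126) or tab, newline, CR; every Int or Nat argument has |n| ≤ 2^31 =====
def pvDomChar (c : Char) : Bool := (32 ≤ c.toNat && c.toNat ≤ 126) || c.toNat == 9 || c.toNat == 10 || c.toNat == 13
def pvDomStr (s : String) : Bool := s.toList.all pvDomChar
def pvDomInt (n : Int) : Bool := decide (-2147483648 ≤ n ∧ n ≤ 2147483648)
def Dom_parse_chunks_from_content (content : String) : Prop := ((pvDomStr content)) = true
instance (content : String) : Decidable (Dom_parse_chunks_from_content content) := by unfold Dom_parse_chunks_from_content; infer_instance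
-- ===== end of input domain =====

-- B replaces A's one-pass state machine by a queue decomposition (drop preamble,
-- then repeatedly consume one header and span off its body); objective: alternative.


-- ===== PORT A =====

-- content.split("\n"); the separator is the non-empty literal "\n", so split? is some
def pvSplitLines (content : String) : List String := (PySem.Str.split? content "\n").getD []

-- line.startswith("========== TEST ")
def pvIsHeader (s : String) : Bool := PySem.Str.startswith s "========== TEST "

-- A's trailing-blank loop: while lines and not lines[-1].strip(): lines.pop(); line_numbers.pop()
def pvRstripA (ls : List String) (ns : List Int) : List String × List Int :=
  if hne : ls = [] then (ls, ns)
  else if PySem.Str.strip (ls.getLast hne) = "" then pvRstripA ls.dropLast ns.dropLast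
  else (ls, ns)
  termination_by ls.length
  decreasing_by
    have := List.length_pos_of_ne_nil hne
    simp [List.length_dropLast]; omega

-- A's main loop over enumerate(content.split("\n"), 1); line.rstrip("\n") is the
-- identity here (split("\n") pieces contain no "\n") and is ported as such.
-- 'if current_test:' is ported as a match on the Option (current_test is a header
-- line when set, hence never the empty string).  On a duplicate header Python A
-- raises ValueError; that input is outside Pre_ and the port returns the chunks
-- accumulated so far.
def pvGoA (chunks : PySem.Dict String (List String × List Int)) (current : Option String)
    (lines : List String) (nums : List Int) :
    List (Int × String) → PySem.Dict String (List String × List Int)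
  | [] =>
      match current with
      | none => chunks
      | some t => chunks.insert t (pvRstripA lines nums)
  | (num, line) :: rest =>
      if pvIsHeader line then
        match current with
        | some t =>
            let chunks' := chunks.insert t (lines, nums)
            if (chunks'.get? line).isSome then chunks'   -- ValueError in Python (outside Pre_)
            else pvGoA chunks' (some line) [] [] rest
        | none =>
            if (chunks.get? line).isSome then chunks     -- ValueError in Python (outside Pre_)
            else pvGoA chunks (some line) lines nums rest
      else
        match current with
        | some _ => pvGoA chunks current (lines ++ [line]) (nums ++ [num]) rest
        | none => pvGoA chunks current lines nums rest

def parse_chunks_from_content (content : String) : List (String × List String × List Int) :=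
  (pvGoA PySem.Dict.empty none [] []
    (PySem.List.enumerate (pvSplitLines content) 1)).items

-- ===== PORT B =====

-- B's last-chunk loop: while body and not body[-1][1].strip(): body.pop()
-- (pop-from-the-back = drop the blank suffix, i.e. dropWhile on the reverse)
def pvDropTrailingBlank (body : List (Int × String)) : List (Int × String) :=
  (body.reverse.dropWhile (fun p => PySem.Str.strip p.2 == "")).reverse

-- B's outer while loop: pop a header off the queue, span off its body, recurse.
-- On a duplicate header Python B raises ValueError; that input is outside Pre_
-- and the port returns the chunks accumulated so far.
def pvGoB (chunks : PySem.Dict String (List String × List Int)) :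
    List (Int × String) → PySem.Dict String (List String × List Int)
  | [] => chunks
  | (_line_num, name) :: rest =>
      if (chunks.get? name).isSome then chunks           -- ValueError in Python (outside Pre_)
      else
        let body := rest.takeWhile (fun p => !pvIsHeader p.2)
        let rest' := rest.dropWhile (fun p => !pvIsHeader p.2)
        let body' := if rest'.isEmpty then pvDropTrailingBlank body else body
        pvGoB (chunks.insert name (body'.map (·.2), body'.map (·.1))) rest'
  termination_by l => l.length
  decreasing_by
    have := List.length_dropWhile_le (fun p => !pvIsHeader p.2) rest
    simp; omega

def parse_chunks_from_content_alt (content : String) : List (String × List String × List Int) :=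
  let numbered := PySem.List.enumerate (pvSplitLines content) 1
  (pvGoB PySem.Dict.empty (numbered.dropWhile (fun p => !pvIsHeader p.2))).items

-- ===== PRECONDITION & SPEC =====

-- Pre_ excludes exactly the inputs with a repeated header line, on which Python A
-- raises ValueError (and Python B raises the same ValueError).
def Pre_parse_chunks_from_content (content : String) : Prop :=
  ((pvSplitLines content).filter
      (fun l => PySem.Str.startswith l "========== TEST ")).Nodup
instance (content : String) : Decidable (Pre_parse_chunks_from_content content) := by
  unfold Pre_parse_chunks_from_content; infer_instance

def pvWitness_parse_chunks_from_content : String :=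
  "preamble\n========== TEST a\nx\n\n========== TEST b\ny\n"

def Spec_parse_chunks_from_content (content : String) (out : List (String × List String × List Int)) : Prop := out = parse_chunks_from_content_alt content
instance (content : String) (out : List (String × List String × List Int)) : Decidable (Spec_parse_chunks_from_content content out) := by unfold Spec_parse_chunks_from_content; infer_instance

-- ===== CLAIM (what is proved, stated in full; the proofs are below) =====
def Claim_equal_parse_chunks_from_content : Prop := ∀ (content : String), Dom_parse_chunks_from_content content → Pre_parse_chunks_from_content content → Spec_parse_chunks_from_content content (parse_chunks_from_content content)

-- ===== LEMMAS AND PROOFS =====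

-- A's pop-pop rstrip loop on the two parallel lists is B's pvDropTrailingBlank on the paired list.
lemma pvRstripA_eq_dropTrailing (acc : List (Int × String)) :
    pvRstripA (acc.map (·.2)) (acc.map (·.1)) =
      ((pvDropTrailingBlank acc).map (·.2), (pvDropTrailingBlank acc).map (·.1)) := by
  induction acc using List.reverseRecOn with
  | nil => simp [pvRstripA, pvDropTrailingBlank]
  | append_singleton acc a ih =>
      rw [pvRstripA]
      have hne : (acc ++ [a]).map (fun x => x.2) ≠ [] := by simp
      rw [dif_neg (by simpa using hne)]
      by_cases hb : PySem.Str.strip a.2 = ""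
      · rw [if_pos (by simp [List.getLast_concat, hb])]
        simp only [List.map_append, List.map_cons, List.map_nil, List.dropLast_concat]
        rw [ih]
        simp [pvDropTrailingBlank, hb]
      · rw [if_neg (by simpa [List.getLast_concat] using hb)]
        simp [pvDropTrailingBlank, hb]

-- the body B will attach to the current header, given A's accumulator and the remaining lines
def pvBody2 (acc es : List (Int × String)) : List (Int × String) :=
  let body := acc ++ es.takeWhile (fun p => !pvIsHeader p.2)
  if (es.dropWhile (fun p => !pvIsHeader p.2)).isEmpty then pvDropTrailingBlank body else body

-- main correspondence: A mid-chunk (header t open, acc accumulated) equals B having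
-- stored t's chunk and continuing at the next header.
lemma pvGoA_some_eq (es : List (Int × String)) :
    ∀ (chunks : PySem.Dict String (List String × List Int)) (t : String)
      (acc : List (Int × String)),
      pvGoA chunks (some t) (acc.map (·.2)) (acc.map (·.1)) es =
        pvGoB (chunks.insert t ((pvBody2 acc es).map (·.2), (pvBody2 acc es).map (·.1)))
          (es.dropWhile (fun p => !pvIsHeader p.2)) := by
  induction es with
  | nil =>
      intro chunks t acc
      simp [pvGoA, pvGoB, pvBody2, pvRstripA_eq_dropTrailing]
  | cons p es ih =>
      intro chunks t acc
      obtain ⟨n, l⟩ := p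
      by_cases hh : pvIsHeader l
      · rw [pvGoA]
        simp only [hh, if_pos]
        have hbody : pvBody2 acc ((n, l) :: es) = acc := by
          simp [pvBody2, hh]
        rw [List.dropWhile_cons]
        simp only [hh, Bool.not_true, Bool.false_eq_true, if_false, hbody]
        rw [pvGoB]
        by_cases hdup : ((chunks.insert t (acc.map (·.2), acc.map (·.1))).get? l).isSome
        · simp [hdup]
        · simp only [hdup, if_neg, Bool.false_eq_true, not_false_eq_true]
          simpa [pvBody2] using
            ih (chunks.insert t (acc.map (·.2), acc.map (·.1))) l []
      · rw [pvGoA]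
        simp only [hh, Bool.false_eq_true, if_false]
        have h2 : acc.map (·.2) ++ [l] = (acc ++ [(n, l)]).map (·.2) := by simp
        have h1 : acc.map (·.1) ++ [n] = (acc ++ [(n, l)]).map (·.1) := by simp
        rw [h2, h1, ih chunks t (acc ++ [(n, l)])]
        have hbody : pvBody2 (acc ++ [(n, l)]) es = pvBody2 acc ((n, l) :: es) := by
          unfold pvBody2
          simp only [List.takeWhile_cons, List.dropWhile_cons, hh, Bool.not_false, if_true]
          simp [List.append_assoc]
        rw [hbody, List.dropWhile_cons]
        simp [hh]

-- before the first header, A skips lines exactly as B's dropWhile does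
lemma pvGoA_none_eq (es : List (Int × String)) :
    ∀ (chunks : PySem.Dict String (List String × List Int)),
      pvGoA chunks none [] [] es =
        pvGoB chunks (es.dropWhile (fun p => !pvIsHeader p.2)) := by
  induction es with
  | nil => intro chunks; simp [pvGoA, pvGoB]
  | cons p es ih =>
      intro chunks
      obtain ⟨n, l⟩ := p
      by_cases hh : pvIsHeader l
      · rw [pvGoA]
        simp only [hh, if_pos]
        rw [List.dropWhile_cons]
        simp only [hh, Bool.not_true, Bool.false_eq_true, if_false]
        rw [pvGoB]
        by_cases hdup : ((chunks.get? l)).isSome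
        · simp [hdup]
        · simp only [hdup, if_neg, Bool.false_eq_true, not_false_eq_true]
          simpa [pvBody2] using pvGoA_some_eq es chunks l []
      · rw [pvGoA]
        simp only [hh, Bool.false_eq_true, if_false]
        rw [List.dropWhile_cons]
        simp [hh, ih]

-- ===== VERDICT (by name: the statement is the Claim_ definition above) =====
theorem parse_chunks_from_content_spec : Claim_equal_parse_chunks_from_content := by
  intro content _ _
  unfold Spec_parse_chunks_from_content parse_chunks_from_content parse_chunks_from_content_alt
  rw [pvGoA_none_eq]
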